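-- pv_equiv track=rewrite | github.com/parshwa15/Arihant_Agency | app.py | _detect_dealer_code_col
-- ===== SOURCE A (Python) =====
-- from typing import Dict, Any, List, Optional
--
-- def _detect_dealer_code_col(headers: List[str]) -> Optional[str]:
--     low = {h.lower(): h for h in headers}
--     for k, v in low.items():
--         cleaned = k.replace("_"," ").replace("-"," ").strip()
--         if cleaned in ("dealer code", "dealercode", "code"):
--             return v
--     for k, v in low.items():
--         if "dealer" in k and "code" in k:
--             return v
--     return None
-- ===== SOURCE B (Python) =====
-- from typing import Dict, Any, List, Optional
--
-- EXACT_TARGETS = ("dealer code", "dealercode", "code")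
--
-- def _rank(k: str) -> int:
--     """0 = exact cleaned match, 1 = 'dealer'&'code' substring match, 2 = no match."""
--     if k.replace("_", " ").replace("-", " ").strip() in EXACT_TARGETS:
--         return 0
--     return 1 if ("dealer" in k and "code" in k) else 2
--
-- def _detect_dealer_code_col(headers: List[str]) -> Optional[str]:
--     low = {h.lower(): h for h in headers}
--     triples = [(_rank(k), i, v) for i, (k, v) in enumerate(low.items())]
--     if not triples:
--         return None
--     best = min(triples, key=lambda t: (t[0], t[1]))
--     return None if best[0] == 2 else best[2]
-- ===== Notes on version B (the rewrite author's own statement) =====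
-- stated objective: alternative
-- what changed: Instead of A's two sequential find-scans over the lowercased-header dict, B assigns each deduped header a rank (0 exact match, 1 substring match, 2 none) and selects the minimum of (rank, position) with min(..., key=...), returning None when the best rank is 2.
import Mathlib
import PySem

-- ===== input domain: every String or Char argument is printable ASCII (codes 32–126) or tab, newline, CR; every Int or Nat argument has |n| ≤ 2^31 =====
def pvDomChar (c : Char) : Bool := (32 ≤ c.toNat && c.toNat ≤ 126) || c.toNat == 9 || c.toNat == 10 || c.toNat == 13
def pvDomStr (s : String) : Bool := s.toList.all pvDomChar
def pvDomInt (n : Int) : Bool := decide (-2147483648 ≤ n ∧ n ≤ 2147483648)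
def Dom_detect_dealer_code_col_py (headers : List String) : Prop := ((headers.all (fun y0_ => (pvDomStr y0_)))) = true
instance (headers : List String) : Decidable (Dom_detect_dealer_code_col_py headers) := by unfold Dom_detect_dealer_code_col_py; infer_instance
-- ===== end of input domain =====

-- B replaces A's two sequential find-scans with rank-based selection: each deduped header gets a
-- rank (0 exact, 1 substring, 2 none) and B returns the value of the (rank, position)-minimal entry
-- (None if its rank is 2) — an alternative algorithm of the same cost.


-- ===== PORT A =====
-- low = {h.lower(): h for h in headers}
def pvALow (headers : List String) : PySem.Dict String String :=
  headers.foldl (fun d h => d.insert (PySem.Str.lower h) h) PySem.Dict.empty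

-- first for-loop of A: exact match on cleaned key
def pvALoop1 : List (String × String) → Option String
  | [] => none
  | (k, v) :: rest =>
      let cleaned := PySem.Str.strip (PySem.Str.replace (PySem.Str.replace k "_" " ") "-" " ")
      if cleaned == "dealer code" || cleaned == "dealercode" || cleaned == "code" then some v
      else pvALoop1 rest

-- second for-loop of A: substring match
def pvALoop2 : List (String × String) → Option String
  | [] => none
  | (k, v) :: rest =>
      if PySem.Str.isIn "dealer" k && PySem.Str.isIn "code" k then some v
      else pvALoop2 rest

def detect_dealer_code_col_py (headers : List String) : Option String :=
  match pvALoop1 (pvALow headers).items with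
  | some v => some v
  | none =>
    match pvALoop2 (pvALow headers).items with
    | some v => some v
    | none => none

-- ===== PORT B =====
-- _rank(k): 0 for an exact cleaned match, 1 for a 'dealer'&'code' substring match, 2 otherwise
def pvRank (k : String) : Nat :=
  let cleaned := PySem.Str.strip (PySem.Str.replace (PySem.Str.replace k "_" " ") "-" " ")
  if cleaned == "dealer code" || cleaned == "dealercode" || cleaned == "code" then 0
  else if PySem.Str.isIn "dealer" k && PySem.Str.isIn "code" k then 1
  else 2

def detect_dealer_code_col_py_alt (headers : List String) : Option String :=
  let low := headers.foldl (fun d h => d.insert (PySem.Str.lower h) h) PySem.Dict.empty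
  let triples := (PySem.List.enumerate low.items 0).map (fun p => (pvRank p.2.1, p.1, p.2.2))
  -- min(triples, key=lambda t: (t[0], t[1])); min2? returns none exactly when the list is empty
  match PySem.List.min2? triples (fun t => t.1) (fun t => t.2.1) with
  | none => none
  | some best => if best.1 == 2 then none else some best.2.2

-- ===== PRECONDITION & SPEC =====
def Spec_detect_dealer_code_col_py (headers : List String) (out : Option String) : Prop := out = detect_dealer_code_col_py_alt headers
instance (headers : List String) (out : Option String) : Decidable (Spec_detect_dealer_code_col_py headers out) := by unfold Spec_detect_dealer_code_col_py; infer_instance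

-- ===== CLAIM (what is proved, stated in full; the proofs are below) =====
def Claim_equal_detect_dealer_code_col_py : Prop := ∀ (headers : List String), Dom_detect_dealer_code_col_py headers → Spec_detect_dealer_code_col_py headers (detect_dealer_code_col_py headers)

-- ===== LEMMAS AND PROOFS =====

-- Bool conditions of the two scans, named for rewriting
def pvExactB (k : String) : Bool :=
  PySem.Str.strip (PySem.Str.replace (PySem.Str.replace k "_" " ") "-" " ") == "dealer code"
    || PySem.Str.strip (PySem.Str.replace (PySem.Str.replace k "_" " ") "-" " ") == "dealercode"
    || PySem.Str.strip (PySem.Str.replace (PySem.Str.replace k "_" " ") "-" " ") == "code"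

def pvSubB (k : String) : Bool := PySem.Str.isIn "dealer" k && PySem.Str.isIn "code" k

theorem pvRank_eq (k : String) :
    pvRank k = if pvExactB k then 0 else if pvSubB k then 1 else 2 := rfl

theorem pvALoop1_cons (k v : String) (rest : List (String × String)) :
    pvALoop1 ((k, v) :: rest) = if pvExactB k then some v else pvALoop1 rest := rfl

theorem pvALoop2_cons (k v : String) (rest : List (String × String)) :
    pvALoop2 ((k, v) :: rest) = if pvSubB k then some v else pvALoop2 rest := rfl

-- the fold step of min2? with keys t.1 (rank) and t.2.1 (index)
def pvStep (acc : Option (Nat × Int × String)) (x : Nat × Int × String) : Option (Nat × Int × String) :=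
  match acc with
  | none => some x
  | some m => if (decide (x.1 < m.1) || !decide (m.1 < x.1) && decide (x.2.1 < m.2.1)) = true then some x else some m

def pvF (p : Int × String × String) : Nat × Int × String := (pvRank p.2.1, p.1, p.2.2)

theorem min2?_eq_foldl (xs : List (Nat × Int × String)) :
    PySem.List.min2? xs (fun t => t.1) (fun t => t.2.1) = xs.foldl pvStep none := by
  unfold PySem.List.min2? pvStep
  congr 1
  funext acc x
  cases acc <;> rfl

-- index-free strict-improvement scan: keeps the first element attaining the minimal rank
def pvBest : List (String × String) → Nat × String → Nat × String
  | [], m => m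
  | (k, v) :: rest, m => if pvRank k < m.1 then pvBest rest (pvRank k, v) else pvBest rest m

-- since indices strictly increase, min2?'s fold only improves on a strictly smaller rank
theorem foldl_step_eq (l : List (String × String)) :
    ∀ (s i : Int) (r : Nat) (v : String), i < s →
    ∃ j : Int, ((PySem.List.enumerate l s).map pvF).foldl pvStep (some (r, i, v))
      = some ((pvBest l (r, v)).1, j, (pvBest l (r, v)).2) := by
  induction l with
  | nil => intro s i r v _; exact ⟨i, rfl⟩
  | cons p rest ih =>
      intro s i r v his
      obtain ⟨k, w⟩ := p
      rw [PySem.List.enumerate_cons]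
      by_cases h : pvRank k < r
      · have hstep : pvStep (some (r, i, v)) (pvF (s, k, w)) = some (pvRank k, s, w) := by
          simp [pvStep, pvF, h]
        simpa [pvBest, h, hstep] using ih (s + 1) s (pvRank k) w (by omega)
      · have hstep : pvStep (some (r, i, v)) (pvF (s, k, w)) = some (r, i, v) := by
          have hns : ¬ s < i := by omega
          simp [pvStep, pvF, h, hns]
        simpa [pvBest, h, hstep] using ih (s + 1) i r v (by omega)

theorem pvBest_zero (l : List (String × String)) : ∀ v, pvBest l (0, v) = (0, v) := by
  induction l with
  | nil => intro v; rfl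
  | cons p rest ih => intro v; obtain ⟨k, w⟩ := p; simp [pvBest, ih]

theorem pvBest_one (l : List (String × String)) :
    ∀ v, (if (pvBest l (1, v)).1 = 2 then none else some (pvBest l (1, v)).2)
      = (match pvALoop1 l with | some w => some w | none => some v) := by
  induction l with
  | nil => intro v; rfl
  | cons p rest ih =>
      intro v
      obtain ⟨k, w⟩ := p
      rw [pvALoop1_cons]
      cases he : pvExactB k
      · have hr : ¬ pvRank k < 1 := by rw [pvRank_eq, he]; split_ifs <;> simp_all
        simp [pvBest, hr, ih]
      · have hr : pvRank k = 0 := by rw [pvRank_eq, he]; rfl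
        simp [pvBest, hr, pvBest_zero]

theorem pvBest_two (l : List (String × String)) :
    ∀ v, (if (pvBest l (2, v)).1 = 2 then none else some (pvBest l (2, v)).2)
      = (match pvALoop1 l with | some w => some w | none => pvALoop2 l) := by
  induction l with
  | nil => intro v; rfl
  | cons p rest ih =>
      intro v
      obtain ⟨k, w⟩ := p
      rw [pvALoop1_cons, pvALoop2_cons]
      cases he : pvExactB k
      · cases hs : pvSubB k
        · have hr : ¬ pvRank k < 2 := by rw [pvRank_eq, he, hs]; simp
          simp [pvBest, hr, ih]
        · have hb : pvBest ((k, w) :: rest) (2, v) = pvBest rest (1, w) := by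
            have hr : pvRank k = 1 := by rw [pvRank_eq, he, hs]; rfl
            simp [pvBest, hr]
          rw [hb, pvBest_one rest w]
          cases pvALoop1 rest <;> simp
      · have hb : pvBest ((k, w) :: rest) (2, v) = (0, w) := by
          have hr : pvRank k = 0 := by rw [pvRank_eq, he]; rfl
          simp [pvBest, hr, pvBest_zero]
        rw [hb]
        simp

-- the rank/min selection over any item list equals A's two staged scans
theorem alt_items_eq (l : List (String × String)) :
    (match PySem.List.min2? ((PySem.List.enumerate l 0).map pvF) (fun t => t.1) (fun t => t.2.1) with
      | none => none
      | some best => if best.1 == 2 then none else some best.2.2)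
    = (match pvALoop1 l with | some v => some v | none => match pvALoop2 l with | some v => some v | none => none) := by
  cases l with
  | nil => rfl
  | cons p rest =>
      obtain ⟨k, v⟩ := p
      rw [min2?_eq_foldl, PySem.List.enumerate_cons]
      obtain ⟨j, hj⟩ := foldl_step_eq rest 1 0 (pvRank k) v (by omega)
      have h1 : (0 : Int) + 1 = 1 := by omega
      simp only [List.map_cons, List.foldl_cons, h1]
      have hinit : pvStep none (pvF ((0 : Int), k, v)) = some (pvRank k, 0, v) := rfl
      rw [hinit, hj]
      simp only [beq_iff_eq, pvALoop1_cons, pvALoop2_cons]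
      cases he : pvExactB k
      · cases hs : pvSubB k
        · have hr : pvRank k = 2 := by rw [pvRank_eq, he, hs]; rfl
          rw [hr, pvBest_two rest v]
          simp only [Bool.false_eq_true, if_false]
          cases pvALoop1 rest <;> cases pvALoop2 rest <;> rfl
        · have hr : pvRank k = 1 := by rw [pvRank_eq, he, hs]; rfl
          rw [hr, pvBest_one rest v]
          cases pvALoop1 rest <;> simp
      · have hr : pvRank k = 0 := by rw [pvRank_eq, he]; rfl
        rw [hr, pvBest_zero rest v]
        simp

-- ===== VERDICT (by name: the statement is the Claim_ definition above) =====
theorem detect_dealer_code_col_py_spec : Claim_equal_detect_dealer_code_col_py := by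
  intro headers _
  unfold Spec_detect_dealer_code_col_py detect_dealer_code_col_py detect_dealer_code_col_py_alt pvALow
  exact (alt_items_eq _).symm
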